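-- pv_equiv track=rewrite | github.com/vivaxgen/microhaps_mito | microhaps_mito/cmds/mito_models.py | transform_kmer_count
-- ===== SOURCE A (Python) =====
-- def transform_kmer_count(sequences, k = 3):
--     all_kmers = {q for p in [["".join(sequence[i:i+k]) for i in range(len(sequence) - k + 1)] for sequence in sequences] for q in p}
--     results = []
--     kmer = sorted(all_kmers)
--
--     for sequence in sequences:
--         kmer_count = [0]*len(kmer)
--         for i in range(len(sequence) - k + 1):
--             kmer_count[kmer.index("".join(sequence[i:i+k]))] += 1
--         results.append(kmer_count)
--     return results, kmer
-- ===== SOURCE B (Python) =====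
-- def transform_kmer_count(sequences, k = 3):
--     # Phase 1: one count-dict per sequence over its k-mers.
--     counters = []
--     for sequence in sequences:
--         c = {}
--         for i in range(len(sequence) - k + 1):
--             km = sequence[i:i+k]
--             c[km] = c.get(km, 0) + 1
--         counters.append(c)
--     # Vocabulary: sorted union of all dict keys.
--     kmer = sorted({km for c in counters for km in c})
--     # Phase 2: assemble each vector by dictionary lookup.
--     results = [[c.get(km, 0) for km in kmer] for c in counters]
--     return results, kmer
-- ===== Notes on version B (the rewrite author's own statement) =====
-- stated objective: alternative
-- what changed: B replaces A's per-occurrence kmer.index linear scan into the sorted vocabulary by a two-phase scheme: first one count-dict per k-mer scan of each sequence, then the vocabulary as the sorted union of dict keys and each vector assembled by dict lookups.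
import Mathlib
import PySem

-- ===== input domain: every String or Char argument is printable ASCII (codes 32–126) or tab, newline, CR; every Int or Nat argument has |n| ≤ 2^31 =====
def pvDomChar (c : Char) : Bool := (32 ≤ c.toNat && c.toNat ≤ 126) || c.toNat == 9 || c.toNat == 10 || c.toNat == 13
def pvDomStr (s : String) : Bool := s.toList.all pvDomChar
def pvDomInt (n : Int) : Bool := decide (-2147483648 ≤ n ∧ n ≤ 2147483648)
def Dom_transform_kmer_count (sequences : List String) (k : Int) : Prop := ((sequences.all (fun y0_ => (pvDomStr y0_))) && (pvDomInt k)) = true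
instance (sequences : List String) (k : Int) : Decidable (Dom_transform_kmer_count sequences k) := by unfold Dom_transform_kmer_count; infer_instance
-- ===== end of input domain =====

-- B replaces A's positional kmer.index scan per occurrence by a two-phase scheme: first one count-dict
-- per sequence, then vectors assembled by dictionary lookup over the sorted key union (objective: alternative).

-- ===== PORT A =====
-- '"".join(sequence[i:i+k])' on a string is exactly the substring sequence[i:i+k]; both Pythons
-- contain this same expression, ported once here via the Python-exact slice.
def pvKm (s : List Char) (k : Int) (i : Int) : String :=
  String.ofList (PySem.List.slice s (some i) (some (i + k)))

def transform_kmer_count (sequences : List String) (k : Int) : List (List Int) × List String :=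
  let all_kmers : PySem.Set String :=
    PySem.Set.ofList ((sequences.map (fun sequence =>
      (PySem.List.pyRange 0 (PySem.Str.len sequence - k + 1) 1).map
        (fun i => pvKm sequence.toList k i))).flatten)
  let kmer := PySem.List.sorted all_kmers (fun x => x) false
  let results := sequences.foldl (fun results sequence =>
    let kmer_count : List Int := List.replicate kmer.length 0
    let kmer_count := (PySem.List.pyRange 0 (PySem.Str.len sequence - k + 1) 1).foldl
      (fun cnt i =>
        -- kmer_count[kmer.index(km)] += 1 ; index? is never none: every k-mer is in kmer
        match PySem.List.index? kmer (pvKm sequence.toList k i) with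
        | some j => cnt.set j (cnt.getD j 0 + 1)
        | none => cnt) kmer_count
    results ++ [kmer_count]) []
  (results, kmer)

-- ===== PORT B =====
def transform_kmer_count_alt (sequences : List String) (k : Int) : List (List Int) × List String :=
  let counters : List (PySem.Dict String Int) :=
    sequences.foldl (fun counters sequence =>
      let c := (PySem.List.pyRange 0 (PySem.Str.len sequence - k + 1) 1).foldl
        (fun c i =>
          let km := pvKm sequence.toList k i
          c.insert km (c.getD km 0 + 1)) PySem.Dict.empty
      counters ++ [c]) []
  let kmer := PySem.List.sorted
    (PySem.Set.ofList ((counters.map (fun c => c.keys)).flatten)) (fun x => x) false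
  let results := counters.map (fun c => kmer.map (fun km => c.getD km 0))
  (results, kmer)

-- ===== PRECONDITION & SPEC =====
def Spec_transform_kmer_count (sequences : List String) (k : Int) (out : List (List Int) × List String) : Prop := out = transform_kmer_count_alt sequences k
instance (sequences : List String) (k : Int) (out : List (List Int) × List String) : Decidable (Spec_transform_kmer_count sequences k out) := by unfold Spec_transform_kmer_count; infer_instance

-- ===== CLAIM (what is proved, stated in full; the proofs are below) =====
def Claim_equal_transform_kmer_count : Prop := ∀ (sequences : List String) (k : Int), Dom_transform_kmer_count sequences k → Spec_transform_kmer_count sequences k (transform_kmer_count sequences k)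

-- ===== LEMMAS AND PROOFS =====

-- the list of k-mers of one sequence, in scan order
def pvKms (s : String) (k : Int) : List String :=
  (PySem.List.pyRange 0 (PySem.Str.len s - k + 1) 1).map (pvKm s.toList k)

-- B's per-sequence dict IS Counter(kms)
theorem pvCounterB_eq (s : String) (k : Int) :
    (PySem.List.pyRange 0 (PySem.Str.len s - k + 1) 1).foldl
      (fun c i =>
        let km := pvKm s.toList k i
        c.insert km (c.getD km 0 + 1)) PySem.Dict.empty
    = PySem.Dict.counter (pvKms s k) := by
  rw [← PySem.Dict.foldl_insert_getD_add_one_eq_counter, pvKms, List.foldl_map]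

-- the two vocabularies agree
theorem pvSortedSet_congr (xs ys : List String)
    (h : ∀ a, a ∈ xs ↔ a ∈ ys) :
    PySem.List.sorted (PySem.Set.ofList xs) (fun x => x) false
    = PySem.List.sorted (PySem.Set.ofList ys) (fun x => x) false := by
  apply PySem.List.eq_of_perm_of_pairwise_le_of_injective (fun x : String => x)
    (fun a b hab => hab)
  · have hperm : (PySem.Set.ofList xs).Perm (PySem.Set.ofList ys) := by
      rw [List.perm_ext_iff_of_nodup (PySem.Set.nodup_ofList xs) (PySem.Set.nodup_ofList ys)]
      intro a
      rw [PySem.Set.mem_ofList, PySem.Set.mem_ofList]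
      exact h a
    exact ((PySem.List.sorted_perm _ _ _).trans hperm).trans
      (PySem.List.sorted_perm _ _ _).symm
  · exact PySem.List.sorted_pairwise _ _
  · exact PySem.List.sorted_pairwise _ _

theorem pvVocab_eq (sequences : List String) (k : Int) :
    PySem.List.sorted
      (PySem.Set.ofList (((sequences.map (fun s => PySem.Dict.counter (pvKms s k))).map
        (fun c => c.keys)).flatten)) (fun x => x) false
    = PySem.List.sorted
      (PySem.Set.ofList ((sequences.map (fun s => pvKms s k)).flatten)) (fun x => x) false := by
  apply pvSortedSet_congr
  intro a
  simp [List.mem_flatten, PySem.Dict.keys_counter, PySem.Set.mem_ofList]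

-- a Nodup vocabulary mapped by f, bumped at the index of each element of l, is f + count
theorem pvTally (vocab : List String) (hnd : vocab.Nodup)
    (l : List String) (hl : ∀ x ∈ l, x ∈ vocab) (f : String → Int) :
    l.foldl (fun cnt km =>
      match PySem.List.index? vocab km with
      | some j => cnt.set j (cnt.getD j 0 + 1)
      | none => cnt) (vocab.map f)
    = vocab.map (fun v => f v + l.count v) := by
  induction l generalizing f with
  | nil => simp
  | cons km t ih =>
    have hkm : km ∈ vocab := hl km (by simp)
    obtain ⟨j, hj⟩ : ∃ j, PySem.List.index? vocab km = some j := by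
      have := (PySem.List.index?_isSome_iff vocab km).mpr hkm
      exact Option.isSome_iff_exists.mp this
    obtain ⟨hk, hjv, -⟩ := PySem.List.getElem_of_index?_eq_some hj
    have hset : ((vocab.map f).set j ((vocab.map f).getD j 0 + 1))
        = vocab.map (fun v => if v = km then f v + 1 else f v) := by
      have hgd : (vocab.map f).getD j 0 = f km := by
        rw [List.getD_eq_getElem?_getD, List.getElem?_eq_getElem (by simpa using hk)]
        simp [hjv]
      apply List.ext_getElem
      · simp
      · intro i hi hi'
        rw [List.getElem_set]
        by_cases hij : j = i
        · subst hij
          simp only [hgd, List.getElem_map, hjv]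
        · have hi0 : i < vocab.length := by simpa using hi'
          have hne : vocab[i] ≠ km := by
            rw [← hjv]
            intro hcontra
            exact hij ((List.Nodup.getElem_inj_iff hnd).mp hcontra.symm)
          simp [hij, hne]
    simp only [List.foldl_cons, hj, hset]
    rw [ih (fun x hx => hl x (by simp [hx])) (fun v => if v = km then f v + 1 else f v)]
    apply List.map_congr_left
    intro v hv
    by_cases hvk : v = km
    · subst hvk
      simp [List.count_cons_self]
      ring
    · simp [hvk, Ne.symm hvk]

-- the vocabulary both ports sort, named once
def pvVocabA (sequences : List String) (k : Int) : List String :=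
  PySem.List.sorted
    (PySem.Set.ofList ((sequences.map (fun s => pvKms s k)).flatten)) (fun x => x) false

theorem pvVocabA_nodup (sequences : List String) (k : Int) : (pvVocabA sequences k).Nodup :=
  ((PySem.List.sorted_perm _ _ _).symm).nodup (PySem.Set.nodup_ofList _)

theorem pvMem_vocabA {sequences : List String} {k : Int} {s : String} (hs : s ∈ sequences)
    {x : String} (hx : x ∈ pvKms s k) : x ∈ pvVocabA sequences k := by
  refine ((PySem.List.sorted_perm _ _ _).mem_iff).mpr ?_
  rw [PySem.Set.mem_ofList]
  exact List.mem_flatten.mpr ⟨pvKms s k, List.mem_map.mpr ⟨s, hs, rfl⟩, hx⟩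

theorem pvMain (sequences : List String) (k : Int) :
    transform_kmer_count sequences k = transform_kmer_count_alt sequences k := by
  unfold transform_kmer_count transform_kmer_count_alt
  simp only [PySem.List.foldl_append_singleton_eq_map, List.nil_append, pvCounterB_eq,
    List.map_map]
  have hkmsA : ∀ s : String,
      (PySem.List.pyRange 0 (PySem.Str.len s - k + 1) 1).map (fun i => pvKm s.toList k i)
        = pvKms s k := fun _ => rfl
  simp only [hkmsA]
  have hvocab :
      PySem.List.sorted
        (PySem.Set.ofList ((sequences.map
          ((fun c => PySem.Dict.keys c) ∘ fun s => PySem.Dict.counter (pvKms s k))).flatten))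
        (fun x => x) false
      = pvVocabA sequences k := by
    have h := pvVocab_eq sequences k
    rw [List.map_map] at h
    exact h
  rw [hvocab]
  simp only [show (PySem.List.sorted
      (PySem.Set.ofList ((sequences.map (fun s => pvKms s k)).flatten)) (fun x => x) false)
      = pvVocabA sequences k from rfl]
  refine Prod.ext ?_ rfl
  apply List.map_congr_left
  intro s hs
  have hl : ∀ x ∈ pvKms s k, x ∈ pvVocabA sequences k := fun x hx => pvMem_vocabA hs hx
  have h0 : List.replicate (pvVocabA sequences k).length (0 : Int)
      = (pvVocabA sequences k).map (fun _ => (0 : Int)) := (List.map_const').symm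
  have hfold := List.foldl_map (f := pvKm s.toList k)
      (g := fun cnt km => match PySem.List.index? (pvVocabA sequences k) km with
            | some j => cnt.set j (cnt.getD j 0 + 1)
            | none => cnt)
      (l := PySem.List.pyRange 0 (PySem.Str.len s - k + 1) 1)
      (init := (pvVocabA sequences k).map (fun _ => (0 : Int)))
  beta_reduce at hfold
  rw [h0, ← hfold, hkmsA,
    pvTally (pvVocabA sequences k) (pvVocabA_nodup sequences k) (pvKms s k) hl]
  apply List.map_congr_left
  intro v _
  rw [PySem.Dict.getD_counter]
  simp

-- ===== VERDICT (by name: the statement is the Claim_ definition above) =====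
theorem transform_kmer_count_spec : Claim_equal_transform_kmer_count := by
  intro sequences k _
  unfold Spec_transform_kmer_count
  exact pvMain sequences k
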